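-- pv_equiv track=rewrite | github.com/F-Canaboi/pandas | scripts/validate_min_versions_in_sync.py | get_versions_from_ci
-- ===== SOURCE A (Python) =====
-- EXCLUDE_DEPS = {"tzdata"}
--
-- def get_versions_from_ci(content: list[str]) -> tuple[dict[str, str], dict[str, str]]:
--     # Don't parse with pyyaml because it ignores comments we're looking for
--     seen_required = False
--     seen_optional = False
--     required_deps = {}
--     optional_deps = {}
--     for line in content:
--         if "# required dependencies" in line:
--             seen_required = True
--         elif "# optional dependencies" in line:
--             seen_optional = True
--         elif "- pip:" in line:
--             continue
--         elif seen_required and line.strip():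
--             if "==" in line:
--                 package, version = line.strip().split("==")
--
--             else:
--                 package, version = line.strip().split("=")
--             package = package[2:]
--             if package in EXCLUDE_DEPS:
--                 continue
--             if not seen_optional:
--                 required_deps[package.casefold()] = version
--             else:
--                 optional_deps[package.casefold()] = version
--     return required_deps, optional_deps
-- ===== SOURCE B (Python) =====
-- EXCLUDE_DEPS = {"tzdata"}
--
-- def get_versions_from_ci(content: list[str]) -> tuple[dict[str, str], dict[str, str]]:
--     # Locate section boundaries first, then classify lines by index.
--     req = next((i for i, l in enumerate(content) if "# required dependencies" in l), None)
--     opt = next(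
--         (i for i, l in enumerate(content)
--          if "# optional dependencies" in l and "# required dependencies" not in l),
--         None,
--     )
--     required_deps: dict[str, str] = {}
--     optional_deps: dict[str, str] = {}
--     if req is None:
--         return required_deps, optional_deps
--     for i, line in enumerate(content):
--         if i <= req:
--             continue
--         if ("# required dependencies" in line or "# optional dependencies" in line
--                 or "- pip:" in line or not line.strip()):
--             continue
--         s = line.strip()
--         package, version = s.split("==") if "==" in s else s.split("=")
--         package = package[2:]
--         if package in EXCLUDE_DEPS:
--             continue
--         target = optional_deps if (opt is not None and opt < i) else required_deps
--         target[package.casefold()] = version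
--     return required_deps, optional_deps
-- ===== Notes on version B (the rewrite author's own statement) =====
-- stated objective: alternative
-- what changed: B replaces A's carried seen_required/seen_optional flags by first locating the two marker-line indices up front, then classifying every dependency line by comparing its index against those precomputed section boundaries.
import Mathlib
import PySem

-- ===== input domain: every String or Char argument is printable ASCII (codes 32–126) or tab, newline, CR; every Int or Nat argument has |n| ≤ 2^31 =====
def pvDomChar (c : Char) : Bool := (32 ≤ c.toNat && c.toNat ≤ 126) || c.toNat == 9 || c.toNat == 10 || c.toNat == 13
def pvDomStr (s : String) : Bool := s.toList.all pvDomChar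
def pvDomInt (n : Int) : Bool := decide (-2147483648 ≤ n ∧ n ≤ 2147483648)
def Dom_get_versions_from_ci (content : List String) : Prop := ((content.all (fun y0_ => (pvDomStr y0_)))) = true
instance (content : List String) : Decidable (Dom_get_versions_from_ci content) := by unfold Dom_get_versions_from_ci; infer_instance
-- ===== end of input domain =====

-- B replaces A's carried seen_required/seen_optional flags by section boundaries located
-- up front (first marker indices), then classifies each line by index comparison (objective: alternative decomposition).

-- ===== PORT A =====
-- shared line tests ('in' on str)
def pvReq (l : String) : Bool := PySem.Str.isIn "# required dependencies" l
def pvOpt (l : String) : Bool := PySem.Str.isIn "# optional dependencies" l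
def pvPip (l : String) : Bool := PySem.Str.isIn "- pip:" l

-- A-side: parse one dependency line; 'none' = the unpacking would raise ValueError (outside Pre_)
def pvParseA (line : String) : Option (String × String) :=
  let s := PySem.Str.strip line
  let parts := if PySem.Str.isIn "==" s then (PySem.Str.split? s "==").getD [] else (PySem.Str.split? s "=").getD []
  match parts with
  | [p, v] => some (PySem.Str.slice p (some 2) none, v)   -- package = package[2:]
  | _ => none

def pvStepA (st : Bool × Bool × PySem.Dict String String × PySem.Dict String String) (line : String) :
    Bool × Bool × PySem.Dict String String × PySem.Dict String String :=
  if pvReq line then (true, st.2.1, st.2.2.1, st.2.2.2)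
  else if pvOpt line then (st.1, true, st.2.2.1, st.2.2.2)
  else if pvPip line then st
  else if st.1 && !(PySem.Str.strip line == "") then
    match pvParseA line with
    | none => st
    | some (pkg, ver) =>
      if pkg = "tzdata" then st
      else if !st.2.1 then
        (st.1, st.2.1, (st.2.2.1).insert (PySem.Str.lower pkg) ver, st.2.2.2)
      else
        (st.1, st.2.1, st.2.2.1, (st.2.2.2).insert (PySem.Str.lower pkg) ver)
  else st

def get_versions_from_ci (content : List String) : (List (String × String)) × (List (String × String)) :=
  let st := content.foldl pvStepA (false, false, PySem.Dict.empty, PySem.Dict.empty)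
  ((st.2.2.1).items, (st.2.2.2).items)

-- ===== PORT B =====
-- B-side: same one-line parser (Source B's split/[2:] code)
def pvParseB (line : String) : Option (String × String) :=
  let s := PySem.Str.strip line
  let parts := if PySem.Str.isIn "==" s then (PySem.Str.split? s "==").getD [] else (PySem.Str.split? s "=").getD []
  match parts with
  | [p, v] => some (PySem.Str.slice p (some 2) none, v)
  | _ => none

def pvStepB (rr : Nat) (opt : Option Nat)
    (acc : PySem.Dict String String × PySem.Dict String String) (p : Int × String) :
    PySem.Dict String String × PySem.Dict String String :=
  if p.1 ≤ (rr : Int) then acc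
  else if pvReq p.2 || pvOpt p.2 || pvPip p.2 || (PySem.Str.strip p.2 == "") then acc
  else match pvParseB p.2 with
    | none => acc
    | some (pkg, ver) =>
      if pkg = "tzdata" then acc
      else if (match opt with | some o => decide ((o : Int) < p.1) | none => false) then
        (acc.1, (acc.2).insert (PySem.Str.lower pkg) ver)
      else ((acc.1).insert (PySem.Str.lower pkg) ver, acc.2)

def get_versions_from_ci_alt (content : List String) : (List (String × String)) × (List (String × String)) :=
  let req := content.findIdx? pvReq
  let opt := content.findIdx? (fun l => pvOpt l && !pvReq l)
  match req with
  | none => ([], [])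
  | some rr =>
    let d := (PySem.List.enumerate content).foldl (pvStepB rr opt) (PySem.Dict.empty, PySem.Dict.empty)
    ((d.1).items, (d.2).items)

-- ===== PRECONDITION & SPEC =====
-- Pre_ excludes exactly the inputs where A raises ValueError: a parsed dependency line
-- (past the required marker, not a marker/pip/blank line) whose stripped text does not
-- split into exactly two pieces on '==' (if present) or on '='.
def Pre_get_versions_from_ci (content : List String) : Prop :=
  ∀ p ∈ PySem.List.enumerate content,
    ((∃ q ∈ PySem.List.enumerate content, q.1 < p.1 ∧ pvReq q.2) ∧
     ¬ pvReq p.2 ∧ ¬ pvOpt p.2 ∧ ¬ pvPip p.2 ∧ PySem.Str.strip p.2 ≠ "") →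
    (if PySem.Str.isIn "==" (PySem.Str.strip p.2)
      then PySem.Str.count (PySem.Str.strip p.2) "==" = 1
      else PySem.Str.count (PySem.Str.strip p.2) "=" = 1)
instance (content : List String) : Decidable (Pre_get_versions_from_ci content) := by
  unfold Pre_get_versions_from_ci; infer_instance

def pvWitness_get_versions_from_ci : List String :=
  ["# required dependencies", "  - numpy=1.26", "# optional dependencies", "  - Bokeh==2.4.2", "- pip:", "", "  - tzdata=2022.1"]

def Spec_get_versions_from_ci (content : List String) (out : (List (String × String)) × (List (String × String))) : Prop := out = get_versions_from_ci_alt content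
instance (content : List String) (out : (List (String × String)) × (List (String × String))) : Decidable (Spec_get_versions_from_ci content out) := by unfold Spec_get_versions_from_ci; infer_instance

-- ===== CLAIM (what is proved, stated in full; the proofs are below) =====
def Claim_equal_get_versions_from_ci : Prop := ∀ (content : List String), Dom_get_versions_from_ci content → Pre_get_versions_from_ci content → Spec_get_versions_from_ci content (get_versions_from_ci content)

-- ===== LEMMAS AND PROOFS =====

-- Shifting a first-match index past a non-matching head.
lemma pvFindIdxShift {α : Type} (p : α → Bool) (x : α) (t : List α) (h : p x = false) (i : Nat) :
    ((x :: t).findIdx? p).map (· + i) = (t.findIdx? p).map (· + (i + 1)) := by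
  simp only [List.findIdx?_cons, h, Bool.false_eq_true, if_false, Option.map_map]
  cases t.findIdx? p <;> simp; omega

-- If no line matches the required marker and the flag starts false, A's fold never touches the dicts.
lemma foldA_no_req (l : List String) (o : Bool) (d1 d2 : PySem.Dict String String)
    (h : ∀ x ∈ l, ¬ pvReq x) :
    ∃ o', l.foldl pvStepA (false, o, d1, d2) = (false, o', d1, d2) := by
  induction l generalizing o with
  | nil => exact ⟨o, rfl⟩
  | cons x t ih =>
    have hx : ¬ pvReq x := h x (by simp)
    have ht : ∀ y ∈ t, ¬ pvReq y := fun y hy => h y (by simp [hy])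
    simp only [List.foldl_cons, pvStepA, hx, Bool.false_eq_true, if_false, Bool.false_and]
    split_ifs <;> simpa using ih _ ht

-- Main invariant: A's flag-carrying fold agrees (on the dict pair) with B's index-classified fold.
set_option maxHeartbeats 1000000 in
lemma foldAB (rr : Nat) (opt : Option Nat) (l : List String) (i : Nat) (r o : Bool)
    (d1 d2 : PySem.Dict String String)
    (hr : if r then rr < i else (l.findIdx? pvReq).map (· + i) = some rr)
    (ho : if o then ∃ k, opt = some k ∧ k < i
          else opt = (l.findIdx? (fun x => pvOpt x && !pvReq x)).map (· + i)) :
    ((l.foldl pvStepA (r, o, d1, d2)).2.2.1, (l.foldl pvStepA (r, o, d1, d2)).2.2.2) =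
      (PySem.List.enumerate l (i : Int)).foldl (pvStepB rr opt) (d1, d2) := by
  induction l generalizing i r o d1 d2 with
  | nil => simp [PySem.List.enumerate_nil]
  | cons x t ih =>
    rw [PySem.List.enumerate_cons, List.foldl_cons, List.foldl_cons]
    have hoKeep : (pvOpt x && !pvReq x) = false →
        (if o then ∃ k, opt = some k ∧ k < i + 1
         else opt = (t.findIdx? (fun x => pvOpt x && !pvReq x)).map (· + (i + 1))) := by
      intro hqnp
      cases o with
      | true =>
        obtain ⟨k, hk, hki⟩ : ∃ k, opt = some k ∧ k < i := by simpa using ho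
        simpa using ⟨k, hk, by omega⟩
      | false =>
        have h0 : opt = ((x :: t).findIdx? (fun x => pvOpt x && !pvReq x)).map (· + i) := by
          simpa using ho
        simpa using h0.trans (pvFindIdxShift _ x t hqnp i)
    by_cases hP : pvReq x
    · have hA : pvStepA (r, o, d1, d2) x = (true, o, d1, d2) := by simp [pvStepA, hP]
      have hB : pvStepB rr opt (d1, d2) ((i : Int), x) = (d1, d2) := by simp [pvStepB, hP]
      have hr' : if true then rr < i + 1
          else ((t.findIdx? pvReq).map (· + (i + 1)) = some rr) := by
        simp only [if_true]
        cases r with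
        | true => have h1 : rr < i := by simpa using hr
                  omega
        | false =>
          have h0 : ((x :: t).findIdx? pvReq).map (· + i) = some rr := by simpa using hr
          rw [List.findIdx?_cons, hP] at h0
          simp at h0; omega
      rw [hA, hB]
      have := ih (i + 1) true o d1 d2 hr' (hoKeep (by simp [hP]))
      simpa using this
    · have hPf : pvReq x = false := by simpa using hP
      have hr'keep : if r then rr < i + 1
          else ((t.findIdx? pvReq).map (· + (i + 1)) = some rr) := by
        cases r with
        | true => have h1 : rr < i := by simpa using hr
                  simpa using by omega
        | false =>
          have h0 : ((x :: t).findIdx? pvReq).map (· + i) = some rr := by simpa using hr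
          simpa using ((pvFindIdxShift pvReq x t hPf i).symm.trans h0)
      by_cases hQ : pvOpt x
      · have hA : pvStepA (r, o, d1, d2) x = (r, true, d1, d2) := by simp [pvStepA, hPf, hQ]
        have hB : pvStepB rr opt (d1, d2) ((i : Int), x) = (d1, d2) := by simp [pvStepB, hQ]
        have ho' : if true then ∃ k, opt = some k ∧ k < i + 1
            else opt = (t.findIdx? (fun x => pvOpt x && !pvReq x)).map (· + (i + 1)) := by
          simp only [if_true]
          cases o with
          | true =>
            obtain ⟨k, hk, hki⟩ : ∃ k, opt = some k ∧ k < i := by simpa using ho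
            exact ⟨k, hk, by omega⟩
          | false =>
            have h0 : opt = ((x :: t).findIdx? (fun x => pvOpt x && !pvReq x)).map (· + i) := by
              simpa using ho
            rw [List.findIdx?_cons] at h0
            simp [hQ, hPf] at h0
            exact ⟨i, h0, by omega⟩
        rw [hA, hB]
        have := ih (i + 1) r true d1 d2 hr'keep ho'
        simpa using this
      · have hqnp : (pvOpt x && !pvReq x) = false := by simp [hQ]
        by_cases hPip : pvPip x
        · have hA : pvStepA (r, o, d1, d2) x = (r, o, d1, d2) := by
            simp [pvStepA, hPf, hQ, hPip]
          have hB : pvStepB rr opt (d1, d2) ((i : Int), x) = (d1, d2) := by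
            simp [pvStepB, hPip]
          rw [hA, hB]
          have := ih (i + 1) r o d1 d2 hr'keep (hoKeep hqnp)
          simpa using this
        · cases r with
          | false =>
            have hA : pvStepA (false, o, d1, d2) x = (false, o, d1, d2) := by
              simp [pvStepA, hPf, hQ, hPip]
            have hirr : (i : Int) ≤ (rr : Int) := by
              have h0 : ((x :: t).findIdx? pvReq).map (· + i) = some rr := by simpa using hr
              rw [pvFindIdxShift pvReq x t hPf i] at h0
              cases h1 : t.findIdx? pvReq with
              | none => rw [h1] at h0; simp at h0
              | some m => rw [h1] at h0; simp at h0; omega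
            have hB : pvStepB rr opt (d1, d2) ((i : Int), x) = (d1, d2) := by
              simp [pvStepB, hirr]
            rw [hA, hB]
            have := ih (i + 1) false o d1 d2 hr'keep (hoKeep hqnp)
            simpa using this
          | true =>
            have hrlt : rr < i := by simpa using hr
            have hnle : ¬ ((i : Int) ≤ (rr : Int)) := by omega
            cases hs : (PySem.Str.strip x == "") with
            | true =>
              have hA : pvStepA (true, o, d1, d2) x = (true, o, d1, d2) := by
                simp [pvStepA, hPf, hQ, hPip, hs]
              have hB : pvStepB rr opt (d1, d2) ((i : Int), x) = (d1, d2) := by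
                simp [pvStepB, hs]
              rw [hA, hB]
              have := ih (i + 1) true o d1 d2 hr'keep (hoKeep hqnp)
              simpa using this
            | false =>
              -- the parsed line: both sides run the same parser, and the optional flag
              -- agrees with the index test against the optional-marker position
              have hB2A : pvParseB x = pvParseA x := rfl
              have hglue : pvStepA (true, o, d1, d2) x =
                  (true, o, (pvStepB rr opt (d1, d2) ((i : Int), x)).1,
                   (pvStepB rr opt (d1, d2) ((i : Int), x)).2) := by
                cases o with
                | true =>
                  obtain ⟨k, hk, hki⟩ : ∃ k, opt = some k ∧ k < i := by simpa using ho
                  simp only [pvStepA, pvStepB, hPf, hQ, hPip, hs, hB2A, hk]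
                  cases hpa : pvParseA x with
                  | none => simp
                  | some pv =>
                    obtain ⟨pkg, ver⟩ := pv
                    by_cases htz : pkg = "tzdata" <;> simp [htz, hnle, hki]
                | false =>
                  have h0 : opt =
                      ((x :: t).findIdx? (fun x => pvOpt x && !pvReq x)).map (· + i) := by
                    simpa using ho
                  rw [pvFindIdxShift _ x t hqnp i] at h0
                  cases h1 : t.findIdx? (fun x => pvOpt x && !pvReq x) with
                  | none =>
                    rw [h1] at h0; simp at h0
                    simp only [pvStepA, pvStepB, hPf, hQ, hPip, hs, hB2A, h0]
                    cases hpa : pvParseA x with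
                    | none => simp
                    | some pv =>
                      obtain ⟨pkg, ver⟩ := pv
                      by_cases htz : pkg = "tzdata" <;> simp [htz, hnle]
                  | some mm =>
                    rw [h1] at h0; simp at h0
                    have hdec : ¬ ((mm + (i + 1) : Nat) : Int) < ((i : Nat) : Int) := by
                      push_cast; omega
                    simp only [pvStepA, pvStepB, hPf, hQ, hPip, hs, hB2A, h0]
                    cases hpa : pvParseA x with
                    | none => simp
                    | some pv =>
                      obtain ⟨pkg, ver⟩ := pv
                      by_cases htz : pkg = "tzdata"
                      · simp [htz]
                      · simp [htz, hnle]
                        intro hlt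
                        exact absurd hlt (by omega)
              rw [hglue]
              have := ih (i + 1) true o
                (pvStepB rr opt (d1, d2) ((i : Int), x)).1
                (pvStepB rr opt (d1, d2) ((i : Int), x)).2 hr'keep (hoKeep hqnp)
              simpa using this

theorem get_versions_from_ci_spec_aux (content : List String) :
    get_versions_from_ci content = get_versions_from_ci_alt content := by
  unfold get_versions_from_ci get_versions_from_ci_alt
  cases hreq : content.findIdx? pvReq with
  | none =>
    have hnone : ∀ x ∈ content, ¬ pvReq x := by
      intro x hx hpx
      have := List.findIdx?_eq_none_iff.mp hreq x hx
      simp [hpx] at this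
    obtain ⟨o', h⟩ := foldA_no_req content false PySem.Dict.empty PySem.Dict.empty hnone
    simp only [h]; rfl
  | some rr =>
    have hr0 : if false then rr < 0
        else (content.findIdx? pvReq).map (· + 0) = some rr := by simp [hreq]
    have ho0 : if false then ∃ k, content.findIdx? (fun l => pvOpt l && !pvReq l) = some k ∧ k < 0
        else content.findIdx? (fun l => pvOpt l && !pvReq l) =
          (content.findIdx? (fun x => pvOpt x && !pvReq x)).map (· + 0) := by simp
    have h := foldAB rr (content.findIdx? (fun l => pvOpt l && !pvReq l)) content 0 false false
      PySem.Dict.empty PySem.Dict.empty hr0 ho0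
    simp only [Int.natCast_zero] at h
    rw [Prod.ext_iff] at h
    exact congrArg₂ Prod.mk (congrArg PySem.Dict.items h.1) (congrArg PySem.Dict.items h.2)

-- ===== VERDICT (by name: the statement is the Claim_ definition above) =====
theorem get_versions_from_ci_spec : Claim_equal_get_versions_from_ci := by
  intro content _ _
  exact get_versions_from_ci_spec_aux content
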